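-- pv_equiv track=rewrite | github.com/nickg-24/cc750 | dockerChannel/sender/encode.py | encode_bin_rep
-- ===== SOURCE A (Python) =====
-- def encode_bin_rep(bin_rep, columns, row):
--     j = 0
--
--     for bit in bin_rep:
--         if j == 18:
--             j = 0
--             row += 1
--         if j < 5:
--             columns[0][row] += bit
--             j += 1
--         elif 5 <= j < 9:
--             columns[1][row] += bit
--             j += 1
--         elif 9 <= j < 13:
--             columns[2][row] += bit
--             j += 1
--         elif 13 <= j < 15:
--             columns[3][row] += bit
--             j += 1
--         elif 15 <= j < 18:
--             columns[4][row] += bit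
--             j += 1
--
--     return columns, row
-- ===== SOURCE B (Python) =====
-- # B: chunk-and-slice re-implementation — slice bin_rep into 18-char chunks and
-- # append fixed sub-slices to each column, instead of A's per-character walk with
-- # a running position counter and a 5-way if-chain. Mutates `columns` in place,
-- # exactly like A.
-- def encode_bin_rep(bin_rep, columns, row):
--     BOUNDS = ((0, 5), (5, 9), (9, 13), (13, 15), (15, 18))
--     if not bin_rep:
--         return columns, row
--     chunk, rest = bin_rep[:18], bin_rep[18:]
--     while True:
--         for k, (a, b) in enumerate(BOUNDS):
--             seg = chunk[a:b]
--             if seg: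
--                 columns[k][row] += seg
--         if not rest:
--             return columns, row
--         row += 1
--         chunk, rest = rest[:18], rest[18:]
-- ===== Notes on version B (the rewrite author's own statement) =====
-- stated objective: simpler
-- what changed: Replaces A's per-character loop with its running position counter j and 5-way if-chain by slicing bin_rep into 18-character chunks and appending the fixed sub-slices [0:5],[5:9],[9:13],[13:15],[15:18] of each chunk to the five columns, advancing the row once per chunk.
import Mathlib
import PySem

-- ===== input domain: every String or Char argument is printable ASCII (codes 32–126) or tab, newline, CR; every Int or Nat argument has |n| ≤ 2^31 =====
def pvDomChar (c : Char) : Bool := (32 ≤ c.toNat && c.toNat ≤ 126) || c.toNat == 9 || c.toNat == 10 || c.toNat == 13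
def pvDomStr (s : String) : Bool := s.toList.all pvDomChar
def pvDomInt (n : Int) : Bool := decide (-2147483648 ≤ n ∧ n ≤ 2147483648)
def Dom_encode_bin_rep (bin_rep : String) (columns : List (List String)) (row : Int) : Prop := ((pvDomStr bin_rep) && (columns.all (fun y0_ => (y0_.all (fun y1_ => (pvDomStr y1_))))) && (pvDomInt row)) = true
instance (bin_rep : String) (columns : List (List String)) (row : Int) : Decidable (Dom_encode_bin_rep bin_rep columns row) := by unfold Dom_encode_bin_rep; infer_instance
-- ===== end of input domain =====

-- B replaces A's per-character walk (position counter + 5-way if-chain) by slicing the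
-- string into 18-char chunks and appending fixed sub-slices to the five columns; both
-- Pythons mutate `columns` in place in exactly the same way, and the equivalence proved
-- here is about the returned (columns, row) value.

-- ===== PORT A =====
-- `columns[k][row] += s` (read cell, append, write back; Python index semantics).
-- Shared by both ports because both Python sources contain this exact statement.
def pvApp (cols : List (List String)) (k : Int) (r : Int) (s : String) : List (List String) :=
  let inner := PySem.List.pyGetD cols k []
  PySem.List.pySetD cols k (PySem.List.pySetD inner r (PySem.List.pyGetD inner r "" ++ s))

-- one iteration of A's `for bit in bin_rep` body; state = (columns, row, j)
def pvStepA (st : List (List String) × Int × Int) (bit : Char) : List (List String) × Int × Int :=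
  let cols := st.1
  let row := if st.2.2 == 18 then st.2.1 + 1 else st.2.1
  let j := if st.2.2 == 18 then 0 else st.2.2
  if j < 5 then (pvApp cols 0 row (String.ofList [bit]), row, j + 1)
  else if 5 ≤ j ∧ j < 9 then (pvApp cols 1 row (String.ofList [bit]), row, j + 1)
  else if 9 ≤ j ∧ j < 13 then (pvApp cols 2 row (String.ofList [bit]), row, j + 1)
  else if 13 ≤ j ∧ j < 15 then (pvApp cols 3 row (String.ofList [bit]), row, j + 1)
  else if 15 ≤ j ∧ j < 18 then (pvApp cols 4 row (String.ofList [bit]), row, j + 1)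
  else (cols, row, j)

def encode_bin_rep (bin_rep : String) (columns : List (List String)) (row : Int) : List (List String) × Int :=
  let st := List.foldl pvStepA (columns, row, 0) bin_rep.toList
  (st.1, st.2.1)

-- ===== PORT B =====
def pvBounds : List (Int × Int) := [(0, 5), (5, 9), (9, 13), (13, 15), (15, 18)]

-- B's inner loop: `for k, (a, b) in enumerate(BOUNDS): seg = chunk[a:b]; if seg: columns[k][row] += seg`
def pvChunkB (cols : List (List String)) (row : Int) (chunk : List Char) : List (List String) :=
  (PySem.List.enumerate pvBounds 0).foldl
    (fun cols kab =>
      let seg := PySem.List.slice chunk (some kab.2.1) (some kab.2.2)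
      if seg.isEmpty then cols else pvApp cols kab.1 row (String.ofList seg))
    cols

-- B's `while True` loop over (chunk, rest); rest shrinks by 18 each round
def pvGoB (cols : List (List String)) (row : Int) (chunk rest : List Char) : List (List String) × Int :=
  let cols := pvChunkB cols row chunk
  if rest.isEmpty then (cols, row)
  else pvGoB cols (row + 1) (PySem.List.slice rest none (some 18)) (PySem.List.slice rest (some 18) none)
termination_by rest.length
decreasing_by
  rw [PySem.List.slice_from rest (by norm_num : (0:Int) ≤ 18)]
  simp only [List.length_drop]
  have h1 : rest ≠ [] := by simpa [List.isEmpty_iff] using ‹¬ rest.isEmpty = true›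
  have h2 : 0 < rest.length := List.length_pos_iff.mpr h1
  omega

def encode_bin_rep_alt (bin_rep : String) (columns : List (List String)) (row : Int) : List (List String) × Int :=
  let cs := bin_rep.toList
  if cs.isEmpty then (columns, row)
  else pvGoB columns row (PySem.List.slice cs none (some 18)) (PySem.List.slice cs (some 18) none)

-- ===== PRECONDITION & SPEC =====
-- Pre_ holds exactly where the Python A returns: every cell A writes — column k of chunk c,
-- at row+c — must exist (k below len(columns) and row+c a valid Python index of columns[k]);
-- otherwise A raises IndexError. Column k is written in chunk c iff the chunk extends past
-- offset 0/5/9/13/15 respectively.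
def Pre_encode_bin_rep (bin_rep : String) (columns : List (List String)) (row : Int) : Prop :=
  ∀ c ∈ List.range ((bin_rep.toList.length + 17) / 18), ∀ k ∈ List.range 5,
    [0, 5, 9, 13, 15].getD k 18 < min 18 (bin_rep.toList.length - 18 * c) →
      PySem.Raise.InRange columns.length (k : Int) ∧
      PySem.Raise.InRange (PySem.List.pyGetD columns (k : Int) []).length (row + c)
instance (bin_rep : String) (columns : List (List String)) (row : Int) : Decidable (Pre_encode_bin_rep bin_rep columns row) := by unfold Pre_encode_bin_rep; infer_instance

def pvWitness_encode_bin_rep : String × List (List String) × Int :=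
  ("101101", [[""], [""], [""], [""], [""]], 0)

def Spec_encode_bin_rep (bin_rep : String) (columns : List (List String)) (row : Int) (out : List (List String) × Int) : Prop := out = encode_bin_rep_alt bin_rep columns row
instance (bin_rep : String) (columns : List (List String)) (row : Int) (out : List (List String) × Int) : Decidable (Spec_encode_bin_rep bin_rep columns row out) := by unfold Spec_encode_bin_rep; infer_instance

-- ===== CLAIM (what is proved, stated in full; the proofs are below) =====
def Claim_equal_encode_bin_rep : Prop := ∀ (bin_rep : String) (columns : List (List String)) (row : Int), Dom_encode_bin_rep bin_rep columns row → Pre_encode_bin_rep bin_rep columns row → Spec_encode_bin_rep bin_rep columns row (encode_bin_rep bin_rep columns row)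

-- ===== LEMMAS AND PROOFS =====

lemma pvIdx_lt {n : Nat} {i : Int} {k : Nat} (h : PySem.List.pyIdx? n i = some k) : k < n := by
  unfold PySem.List.pyIdx? at h
  split_ifs at h <;> simp_all <;> omega

lemma pvGetD_some {α : Type} {xs : List α} {i : Int} {k : Nat}
    (h : PySem.List.pyIdx? xs.length i = some k) (d : α) :
    PySem.List.pyGetD xs i d = xs[k]'(pvIdx_lt h) := by
  unfold PySem.List.pyGetD PySem.List.pyGet?
  rw [h]
  simp [List.getElem?_eq_getElem (pvIdx_lt h)]

lemma pvSetD_some {α : Type} {xs : List α} {i : Int} {k : Nat}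
    (h : PySem.List.pyIdx? xs.length i = some k) (v : α) :
    PySem.List.pySetD xs i v = xs.set k v := by
  unfold PySem.List.pySetD PySem.List.pySet?
  rw [h]
  rfl

lemma pvSetD_none {α : Type} {xs : List α} {i : Int}
    (h : PySem.List.pyIdx? xs.length i = none) (v : α) :
    PySem.List.pySetD xs i v = xs := by
  unfold PySem.List.pySetD PySem.List.pySet?
  rw [h]
  rfl

-- writing back the value just read is a no-op (also out of range)
lemma pvSetD_getD {α : Type} (xs : List α) (i : Int) (d : α) :
    PySem.List.pySetD xs i (PySem.List.pyGetD xs i d) = xs := by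
  cases h : PySem.List.pyIdx? xs.length i with
  | none => rw [pvSetD_none h]
  | some k => rw [pvGetD_some h, pvSetD_some h, List.set_getElem_self]

lemma pvApp_empty (cols : List (List String)) (k r : Int) :
    pvApp cols k r "" = cols := by
  unfold pvApp
  simp only [show ∀ s : String, s ++ "" = s from by simp]
  rw [pvSetD_getD, pvSetD_getD]

lemma pvApp_guard (cols : List (List String)) (k r : Int) (seg : List Char) :
    (if seg.isEmpty then cols else pvApp cols k r (String.ofList seg)) =
      pvApp cols k r (String.ofList seg) := by
  cases seg with
  | nil => simp [pvApp_empty]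
  | cons c t => simp

-- two consecutive appends to the same cell merge
lemma pvApp_append (cols : List (List String)) (k r : Int) (a b : List Char) :
    pvApp (pvApp cols k r (String.ofList a)) k r (String.ofList b) =
      pvApp cols k r (String.ofList (a ++ b)) := by
  cases hk : PySem.List.pyIdx? cols.length k with
  | none =>
      simp only [pvApp]
      rw [pvSetD_none hk, pvSetD_none hk, pvSetD_none hk]
  | some kc =>
      have hkc := pvIdx_lt hk
      cases hr : PySem.List.pyIdx? (cols[kc]'hkc).length r with
      | none =>
          have key : ∀ s : String, pvApp cols k r s = cols := by
            intro s
            simp only [pvApp]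
            rw [pvGetD_some hk, pvSetD_none hr, pvSetD_some hk, List.set_getElem_self]
          rw [key, key, key]
      | some ri =>
          have hri := pvIdx_lt hr
          have e1 : ∀ s : String, pvApp cols k r s =
              cols.set kc ((cols[kc]'hkc).set ri ((cols[kc]'hkc)[ri]'hri ++ s)) := by
            intro s
            simp only [pvApp]
            rw [pvGetD_some hk, pvGetD_some hr, pvSetD_some hr, pvSetD_some hk]
          simp only [e1]
          have hk2 : PySem.List.pyIdx?
              (cols.set kc ((cols[kc]'hkc).set ri ((cols[kc]'hkc)[ri]'hri ++ String.ofList a))).length k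
              = some kc := by simpa using hk
          have hG : (cols.set kc ((cols[kc]'hkc).set ri ((cols[kc]'hkc)[ri]'hri ++ String.ofList a)))[kc]'(pvIdx_lt hk2)
              = (cols[kc]'hkc).set ri ((cols[kc]'hkc)[ri]'hri ++ String.ofList a) := by
            simp
          have hr2 : PySem.List.pyIdx?
              ((cols.set kc ((cols[kc]'hkc).set ri ((cols[kc]'hkc)[ri]'hri ++ String.ofList a)))[kc]'(pvIdx_lt hk2)).length r
              = some ri := by
            rw [hG]
            simpa using hr
          simp only [pvApp]
          rw [pvGetD_some hk2, pvSetD_some hk2, hG, pvGetD_some (by simpa using hr),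
              pvSetD_some (by simpa using hr)]
          simp [List.set_set, String.append_assoc]

def pvBranch (j : Int) : Int :=
  if j < 5 then 0 else if j < 9 then 1 else if j < 13 then 2 else if j < 15 then 3 else 4

lemma pvStepA_eq (cols : List (List String)) (r : Int) {j : Int} (c : Char)
    (h0 : 0 ≤ j) (h18 : j < 18) :
    pvStepA (cols, r, j) c = (pvApp cols (pvBranch j) r (String.ofList [c]), r, j + 1) := by
  have hne : (j == 18) = false := by simp; omega
  unfold pvStepA pvBranch
  simp only [hne, Bool.false_eq_true, if_false]
  split_ifs <;> first | rfl | omega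

lemma pvSeg (s : List Char) : ∀ (cols : List (List String)) (r j0 k : Int),
    0 ≤ j0 → j0 + s.length ≤ 18 →
    (∀ j : Int, j0 ≤ j → j < j0 + s.length → pvBranch j = k) →
    List.foldl pvStepA (cols, r, j0) s =
      (pvApp cols k r (String.ofList s), r, j0 + s.length) := by
  induction s with
  | nil => intro cols r j0 k _ _ _; simp [pvApp_empty]
  | cons c t ih =>
      intro cols r j0 k h0 h18 hb
      simp only [List.foldl_cons]
      rw [pvStepA_eq cols r c h0 (by simp only [List.length_cons] at h18; push_cast at h18; omega)]
      rw [hb j0 le_rfl (by simp only [List.length_cons]; push_cast; omega)]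
      rw [ih _ r (j0 + 1) k (by omega)
            (by simp only [List.length_cons] at h18 ⊢; push_cast at h18 ⊢; omega)
            (fun j hj1 hj2 => hb j (by omega)
              (by simp only [List.length_cons] at hj2 ⊢; push_cast at hj2 ⊢; omega))]
      rw [pvApp_append]
      refine congrArg₂ Prod.mk (by simp) (congrArg₂ Prod.mk rfl ?_)
      simp only [List.length_cons]
      push_cast
      omega

lemma pvChunk (chunk : List Char) (cols : List (List String)) (r : Int)
    (h : chunk.length ≤ 18) :
    List.foldl pvStepA (cols, r, 0) chunk =
      (pvChunkB cols r chunk, r, (chunk.length : Int)) := by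
  have hdec : chunk = chunk.take 5 ++ ((chunk.drop 5).take 4 ++ ((chunk.drop 9).take 4 ++
      ((chunk.drop 13).take 2 ++ chunk.drop 15))) := by
    rw [show chunk.drop 15 = (chunk.drop 13).drop 2 by simp [List.drop_drop],
        List.take_append_drop,
        show chunk.drop 13 = (chunk.drop 9).drop 4 by simp [List.drop_drop],
        List.take_append_drop,
        show chunk.drop 9 = (chunk.drop 5).drop 4 by simp [List.drop_drop],
        List.take_append_drop, List.take_append_drop]
  have hb0 : ∀ j : Int, (0:Int) ≤ j → j < 0 + ((chunk.take 5).length : Int) → pvBranch j = 0 := by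
    intro j h1 h2
    simp only [List.length_take] at h2
    push_cast at h2
    unfold pvBranch
    split_ifs <;> omega
  have hb1 : ∀ j : Int, 0 + ((chunk.take 5).length : Int) ≤ j →
      j < 0 + ((chunk.take 5).length : Int) + (((chunk.drop 5).take 4).length : Int) →
      pvBranch j = 1 := by
    intro j h1 h2
    simp only [List.length_take, List.length_drop] at h1 h2
    push_cast at h1 h2
    unfold pvBranch
    split_ifs <;> omega
  have hb2 : ∀ j : Int, 0 + ((chunk.take 5).length : Int) + (((chunk.drop 5).take 4).length : Int) ≤ j →
      j < 0 + ((chunk.take 5).length : Int) + (((chunk.drop 5).take 4).length : Int) + (((chunk.drop 9).take 4).length : Int) →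
      pvBranch j = 2 := by
    intro j h1 h2
    simp only [List.length_take, List.length_drop] at h1 h2
    push_cast at h1 h2
    unfold pvBranch
    split_ifs <;> omega
  have hb3 : ∀ j : Int, 0 + ((chunk.take 5).length : Int) + (((chunk.drop 5).take 4).length : Int) + (((chunk.drop 9).take 4).length : Int) ≤ j →
      j < 0 + ((chunk.take 5).length : Int) + (((chunk.drop 5).take 4).length : Int) + (((chunk.drop 9).take 4).length : Int) + (((chunk.drop 13).take 2).length : Int) →
      pvBranch j = 3 := by
    intro j h1 h2
    simp only [List.length_take, List.length_drop] at h1 h2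
    push_cast at h1 h2
    unfold pvBranch
    split_ifs <;> omega
  have hb4 : ∀ j : Int, 0 + ((chunk.take 5).length : Int) + (((chunk.drop 5).take 4).length : Int) + (((chunk.drop 9).take 4).length : Int) + (((chunk.drop 13).take 2).length : Int) ≤ j →
      j < 0 + ((chunk.take 5).length : Int) + (((chunk.drop 5).take 4).length : Int) + (((chunk.drop 9).take 4).length : Int) + (((chunk.drop 13).take 2).length : Int) + ((chunk.drop 15).length : Int) →
      pvBranch j = 4 := by
    intro j h1 h2
    simp only [List.length_take, List.length_drop] at h1 h2
    push_cast at h1 h2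
    unfold pvBranch
    split_ifs <;> omega
  conv_lhs => rw [hdec]
  rw [List.foldl_append, List.foldl_append, List.foldl_append, List.foldl_append]
  rw [pvSeg (chunk.take 5) cols r 0 0 le_rfl
        (by simp only [List.length_take]; push_cast; omega) hb0]
  rw [pvSeg ((chunk.drop 5).take 4) _ r _ 1 (by positivity)
        (by simp only [List.length_take, List.length_drop]; push_cast; omega) hb1]
  rw [pvSeg ((chunk.drop 9).take 4) _ r _ 2 (by positivity)
        (by simp only [List.length_take, List.length_drop]; push_cast; omega) hb2]
  rw [pvSeg ((chunk.drop 13).take 2) _ r _ 3 (by positivity)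
        (by simp only [List.length_take, List.length_drop]; push_cast; omega) hb3]
  rw [pvSeg (chunk.drop 15) _ r _ 4 (by positivity)
        (by simp only [List.length_take, List.length_drop]; push_cast; omega) hb4]
  refine congrArg₂ Prod.mk ?_ (congrArg₂ Prod.mk rfl ?_)
  · unfold pvChunkB pvBounds
    simp only [PySem.List.enumerate_cons, PySem.List.enumerate_nil, List.foldl_cons,
               List.foldl_nil]
    rw [PySem.List.slice_toNat chunk (by norm_num) (by norm_num),
        PySem.List.slice_toNat chunk (by norm_num) (by norm_num),
        PySem.List.slice_toNat chunk (by norm_num) (by norm_num),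
        PySem.List.slice_toNat chunk (by norm_num) (by norm_num),
        PySem.List.slice_toNat chunk (by norm_num) (by norm_num)]
    rw [pvApp_guard, pvApp_guard, pvApp_guard, pvApp_guard, pvApp_guard]
    simp only [show Int.toNat 5 = 5 from rfl, show Int.toNat 9 = 9 from rfl,
               show Int.toNat 13 = 13 from rfl, show Int.toNat 15 = 15 from rfl,
               show Int.toNat 18 = 18 from rfl]
    norm_num
    have h15 : (chunk.drop 15).length ≤ 3 := by simp; omega
    rw [List.take_of_length_le h15]
  · simp only [List.length_take, List.length_drop]
    push_cast
    omega

lemma pvReset (cs : List Char) (cols : List (List String)) (r : Int) (h : cs ≠ []) :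
    List.foldl pvStepA (cols, r, 18) cs = List.foldl pvStepA (cols, r + 1, 0) cs := by
  cases cs with
  | nil => exact absurd rfl h
  | cons c t =>
      simp only [List.foldl_cons]
      congr 1

lemma pvMain : ∀ (n : Nat) (cs : List Char) (cols : List (List String)) (r : Int),
    cs.length ≤ n → cs ≠ [] →
    ((List.foldl pvStepA (cols, r, 0) cs).1, (List.foldl pvStepA (cols, r, 0) cs).2.1) =
      pvGoB cols r (cs.take 18) (cs.drop 18) := by
  intro n
  induction n with
  | zero => intro cs cols r hle hne; simp at hle; exact absurd hle hne
  | succ n ih =>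
      intro cs cols r hle hne
      have hchunk : (cs.take 18).length ≤ 18 := by simp
      conv_lhs => rw [← List.take_append_drop 18 cs, List.foldl_append,
                      pvChunk (cs.take 18) cols r hchunk]
      rw [pvGoB]
      cases hrest : (cs.drop 18).isEmpty with
      | true =>
          have hnil : cs.drop 18 = [] := by simpa [List.isEmpty_iff] using hrest
          simp [hnil]
      | false =>
          have hne' : cs.drop 18 ≠ [] := by simpa [List.isEmpty_iff] using hrest
          have hlong : 18 < cs.length := by
            by_contra hc
            exact hne' (List.drop_eq_nil_of_le (by omega))
          have h18 : ((cs.take 18).length : Int) = 18 := by simp; omega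
          rw [h18, pvReset _ _ _ hne',
              ih (cs.drop 18) (pvChunkB cols r (cs.take 18)) (r + 1) (by simp; omega) hne']
          simp only [Bool.false_eq_true, if_false]
          rw [PySem.List.slice_to (cs.drop 18) (by norm_num : (0:Int) ≤ 18),
              PySem.List.slice_from (cs.drop 18) (by norm_num : (0:Int) ≤ 18)]
          simp [List.drop_drop]

-- ===== VERDICT (by name: the statement is the Claim_ definition above) =====
theorem encode_bin_rep_spec : Claim_equal_encode_bin_rep := by
  intro bin_rep columns row _ _
  unfold Spec_encode_bin_rep encode_bin_rep encode_bin_rep_alt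
  cases h : bin_rep.toList.isEmpty with
  | true =>
      have hnil : bin_rep.toList = [] := by simpa [List.isEmpty_iff] using h
      simp [hnil]
  | false =>
      have hne : bin_rep.toList ≠ [] := by simpa [List.isEmpty_iff] using h
      simp only [h, Bool.false_eq_true, if_false]
      rw [PySem.List.slice_to bin_rep.toList (by norm_num : (0:Int) ≤ 18),
          PySem.List.slice_from bin_rep.toList (by norm_num : (0:Int) ≤ 18)]
      exact pvMain bin_rep.toList.length bin_rep.toList columns row le_rfl hne
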